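-- pv_equiv track=rewrite | github.com/zxconan313/GraphPyRec | code2graph__v1.py | add_dataflow
-- ===== SOURCE A (Python) =====
-- def add_dataflow(list1, list2, list3):
--     """
--     :param list1: dataflow_list
--     :param list2: no_list
--     :param list3: graph_edge
--     :return:
--     """
--     for n in list1:
--         a, b = n[0], n[1]
--         start = list2.index(a)
--         if list2[start + 1] == a:
--             start = start + 1
--         end = list2.index(b)
--         if end < len(list2) - 1:
--             if list2[end + 1] == b:
--                 end = end + 1
--         start += 1
--         end += 1
--         flag = 0
--         for edge in list3:
--             if edge[0] == start and edge[2] == end: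
--                 edge[1] = 3
--                 flag = 1
--                 break
--         if flag == 0:
--             list3.append([start, 2, end])
--     return list3
-- ===== SOURCE B (Python) =====
-- def add_dataflow(list1, list2, list3):
--     # Staged batch rewrite: (1) map every dataflow pair to its (start, end) key using a
--     # first-index table for list2, (2) tally which keys occur and which occur more than once,
--     # (3) ONE sweep over list3 marks the first existing edge of each needed key (edge[1] = 3),
--     # (4) the keys no sweep hit are appended in first-occurrence order, middle 3 if the key
--     # repeats in list1 (a later duplicate pair would have re-found the appended edge) else 2.
--     # Mutates list3 in place (edge[1] = 3 / append) exactly as the original does.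
--     n2 = len(list2)
--     first = {}
--     for i, v in enumerate(list2):
--         if v not in first:
--             first[v] = i
--
--     def pos(v):
--         p = first[v]
--         if p + 1 < n2 and list2[p + 1] == v:
--             p += 1
--         return p + 1
--
--     keys = [(pos(n[0]), pos(n[1])) for n in list1]
--
--     dup = {}
--     order = []
--     for k in keys:
--         if k in dup:
--             dup[k] = True
--         else:
--             dup[k] = False
--             order.append(k)
--
--     hit = set()
--     for edge in list3:
--         if len(edge) > 2:
--             k = (edge[0], edge[2])
--             if k in dup and k not in hit:
--                 edge[1] = 3
--                 hit.add(k)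
--
--     for k in order:
--         if k not in hit:
--             list3.append([k[0], 3 if dup[k] else 2, k[1]])
--     return list3
-- ===== Notes on version B (the rewrite author's own statement) =====
-- stated objective: alternative
-- what changed: Replaces A's interleaved per-pair loop (rescan list3 and mutate for every dataflow pair) by staged batch passes: map all pairs to (start,end) keys via a first-index table, tally first occurrences and repeats, mark existing edges in one sweep over list3, then append the never-hit keys with middle 3 if the key repeats else 2.
import Mathlib
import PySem

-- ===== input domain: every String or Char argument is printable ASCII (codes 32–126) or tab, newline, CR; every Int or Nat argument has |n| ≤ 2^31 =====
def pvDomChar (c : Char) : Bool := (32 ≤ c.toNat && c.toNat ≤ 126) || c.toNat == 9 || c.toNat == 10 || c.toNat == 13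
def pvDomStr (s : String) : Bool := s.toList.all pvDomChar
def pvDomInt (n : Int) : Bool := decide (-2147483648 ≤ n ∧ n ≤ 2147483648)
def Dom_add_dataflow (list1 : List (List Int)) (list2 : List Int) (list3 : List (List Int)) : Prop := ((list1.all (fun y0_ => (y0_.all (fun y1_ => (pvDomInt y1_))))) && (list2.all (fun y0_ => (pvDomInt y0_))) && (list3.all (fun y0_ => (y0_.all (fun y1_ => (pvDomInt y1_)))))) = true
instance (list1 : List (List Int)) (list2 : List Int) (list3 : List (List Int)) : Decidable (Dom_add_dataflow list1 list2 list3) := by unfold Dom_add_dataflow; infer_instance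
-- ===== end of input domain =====

-- B is a staged batch rewrite (same cost class, different decomposition): it first maps every
-- dataflow pair to its (start, end) key and tallies first occurrences and repeats, then marks
-- existing edges in ONE sweep over list3, then appends the never-hit keys — instead of A's
-- per-pair rescan of list3 with interleaved mutation. Equivalence is about the RETURN value
-- (both Pythons also mutate list3 in place in the same way).

-- ===== PORT A =====
-- Under Pre_ every index?/pyGetD hit on list1/list2 is defined, so those .getD defaults are never
-- read (the start-bump default a+1 / b+1 is ≠ a / b). On a list3 row shorter than 3 Python A reads
-- edge[2] (an IndexError) only after edge[0] matched; the port reads the missing cell as default 0,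
-- which no computed end position (always ≥ 1) ever equals, so the row is skipped exactly as Python
-- skips it in every run of A that returns.

-- inner 'for edge in list3: … break' loop: first edge with edge[0]==start and edge[2]==end gets edge[1]=3
def pvA_find (s e : Int) : List (List Int) → Option (List (List Int))
  | [] => none
  | edge :: rest =>
    if PySem.List.pyGetD edge 0 0 == s && PySem.List.pyGetD edge 2 0 == e then
      some (PySem.List.pySetD edge 1 3 :: rest)
    else
      match pvA_find s e rest with
      | some r => some (edge :: r)
      | none   => none

def pvA_start (list2 : List Int) (a : Int) : Int :=
  let s0 : Int := ((PySem.List.index? list2 a).getD 0 : Nat)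
  let s1 : Int := if PySem.List.pyGetD list2 (s0 + 1) (a + 1) == a then s0 + 1 else s0
  s1 + 1

def pvA_end (list2 : List Int) (b : Int) : Int :=
  let e0 : Int := ((PySem.List.index? list2 b).getD 0 : Nat)
  let e1 : Int :=
    if e0 < (list2.length : Int) - 1 then
      if PySem.List.pyGetD list2 (e0 + 1) (b + 1) == b then e0 + 1 else e0
    else e0
  e1 + 1

def pvA_step (list2 : List Int) (l3 : List (List Int)) (n : List Int) : List (List Int) :=
  let a := PySem.List.pyGetD n 0 0
  let b := PySem.List.pyGetD n 1 0
  let s := pvA_start list2 a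
  let e := pvA_end list2 b
  match pvA_find s e l3 with
  | some l => l
  | none   => l3 ++ [[s, 2, e]]

def add_dataflow (list1 : List (List Int)) (list2 : List Int) (list3 : List (List Int)) : List (List Int) :=
  list1.foldl (pvA_step list2) list3

-- ===== PORT B =====
-- 'for i, v in enumerate(list2): if v not in first: first[v] = i'
def pvB_first (list2 : List Int) : PySem.Dict Int Int :=
  (PySem.List.enumerate list2 0).foldl
    (fun d p => if d.contains p.2 then d else d.insert p.2 p.1) PySem.Dict.empty

-- 'def pos(v): p = first[v]; if p + 1 < n2 and list2[p+1] == v: p += 1; return p + 1'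
def pvB_pos (list2 : List Int) (n2 : Int) (first : PySem.Dict Int Int) (v : Int) : Int :=
  let p := first.getD v 0
  let p1 := if decide (p + 1 < n2) && (PySem.List.pyGetD list2 (p + 1) (v + 1) == v) then p + 1 else p
  p1 + 1

-- 'keys = [(pos(n[0]), pos(n[1])) for n in list1]'
def pvB_keys (list1 : List (List Int)) (list2 : List Int) : List (Int × Int) :=
  list1.map (fun n =>
    (pvB_pos list2 (list2.length : Int) (pvB_first list2) (PySem.List.pyGetD n 0 0),
     pvB_pos list2 (list2.length : Int) (pvB_first list2) (PySem.List.pyGetD n 1 0)))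

-- 'for k in keys: if k in dup: dup[k] = True else: dup[k] = False; order.append(k)'
def pvB_dupStep (st : PySem.Dict (Int × Int) Bool × List (Int × Int)) (k : Int × Int) :
    PySem.Dict (Int × Int) Bool × List (Int × Int) :=
  if st.1.contains k then (st.1.insert k true, st.2)
  else (st.1.insert k false, st.2 ++ [k])

-- 'for edge in list3: if len(edge) > 2: k = (edge[0], edge[2]); if k in dup and k not in hit: edge[1] = 3; hit.add(k)'
def pvB_markStep (dup : PySem.Dict (Int × Int) Bool)
    (st : List (List Int) × PySem.Set (Int × Int)) (edge : List Int) :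
    List (List Int) × PySem.Set (Int × Int) :=
  if decide (2 < edge.length) then
    if dup.contains (PySem.List.pyGetD edge 0 0, PySem.List.pyGetD edge 2 0) &&
        !(PySem.Set.contains st.2 (PySem.List.pyGetD edge 0 0, PySem.List.pyGetD edge 2 0)) then
      (st.1 ++ [PySem.List.pySetD edge 1 3],
       PySem.Set.add st.2 (PySem.List.pyGetD edge 0 0, PySem.List.pyGetD edge 2 0))
    else (st.1 ++ [edge], st.2)
  else (st.1 ++ [edge], st.2)

-- 'for k in order: if k not in hit: list3.append([k[0], 3 if dup[k] else 2, k[1]])'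
def add_dataflow_alt (list1 : List (List Int)) (list2 : List Int) (list3 : List (List Int)) : List (List Int) :=
  let K := pvB_keys list1 list2
  let dord := K.foldl pvB_dupStep (PySem.Dict.empty, ([] : List (Int × Int)))
  let mh := list3.foldl (pvB_markStep dord.1) (([] : List (List Int)), (PySem.Set.empty : PySem.Set (Int × Int)))
  dord.2.foldl
    (fun acc k =>
      if PySem.Set.contains mh.2 k then acc
      else acc ++ [[k.1, if dord.1.getD k false then 3 else 2, k.2]]) mh.1

-- ===== PRECONDITION & SPEC =====
-- Pre_ excludes only inputs on which Python A raises: a row of list1 shorter than 2, a pair value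
-- missing from list2 (ValueError), or the first occurrence of n[0] at the last index of list2
-- (IndexError on the unguarded list2[start+1]). It admits every input on which A returns; the one
-- remaining way A can raise inside Pre_ — a list3 row shorter than 3 whose edge[0] happens to equal
-- a computed start — is not a closed-form condition on the input, so it is not carved out.
def Pre_add_dataflow (list1 : List (List Int)) (list2 : List Int) (list3 : List (List Int)) : Prop :=
  ∀ n ∈ list1, 2 ≤ n.length ∧
    PySem.List.pyGetD n 0 0 ∈ list2 ∧ PySem.List.pyGetD n 1 0 ∈ list2 ∧
    (PySem.List.index? list2 (PySem.List.pyGetD n 0 0)).getD 0 + 1 < list2.length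

instance (list1 : List (List Int)) (list2 : List Int) (list3 : List (List Int)) : Decidable (Pre_add_dataflow list1 list2 list3) := by
  unfold Pre_add_dataflow; infer_instance

def pvWitness_add_dataflow : List (List Int) × List Int × List (List Int) :=
  ([[0, 1]], [0, 1, 2], [[1, 2, 2]])

def Spec_add_dataflow (list1 : List (List Int)) (list2 : List Int) (list3 : List (List Int)) (out : List (List Int)) : Prop := out = add_dataflow_alt list1 list2 list3
instance (list1 : List (List Int)) (list2 : List Int) (list3 : List (List Int)) (out : List (List Int)) : Decidable (Spec_add_dataflow list1 list2 list3 out) := by unfold Spec_add_dataflow; infer_instance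

-- ===== CLAIM (what is proved, stated in full; the proofs are below) =====
def Claim_equal_add_dataflow : Prop := ∀ (list1 : List (List Int)) (list2 : List Int) (list3 : List (List Int)), Dom_add_dataflow list1 list2 list3 → Pre_add_dataflow list1 list2 list3 → Spec_add_dataflow list1 list2 list3 (add_dataflow list1 list2 list3)

-- ===== LEMMAS AND PROOFS =====

-- shared vocabulary of the proofs: a row's key, well-formedness, the matching predicate,
-- the marking operation, and the canonical staged form both programs are reduced to
def pvOk (ed : List Int) : Bool := decide (2 < ed.length)
def pvKeyOf (ed : List Int) : Int × Int := (PySem.List.pyGetD ed 0 0, PySem.List.pyGetD ed 2 0)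
def pvPred (k : Int × Int) (ed : List Int) : Bool := pvOk ed && (pvKeyOf ed == k)
def pvSet3 (ed : List Int) : List Int := PySem.List.pySetD ed 1 3
def pvHas (L : List (List Int)) (k : Int × Int) : Bool := L.any (pvPred k)

-- mark, in one sweep, the first well-formed edge of each still-remaining key
def pvMark : List (Int × Int) → List (List Int) → List (List Int) × List (Int × Int)
  | rem, [] => ([], rem)
  | rem, e :: t =>
    if pvOk e && decide (pvKeyOf e ∈ rem) then
      (pvSet3 e :: (pvMark (rem.erase (pvKeyOf e)) t).1, (pvMark (rem.erase (pvKeyOf e)) t).2)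
    else
      (e :: (pvMark rem t).1, (pvMark rem t).2)

-- first occurrences, in order
def pvFo : List (Int × Int) → List (Int × Int)
  | [] => []
  | k :: t => k :: (pvFo t).filter (fun x => decide (x ≠ k))

def pvRow (K : List (Int × Int)) (k : Int × Int) : List Int :=
  [k.1, if 2 ≤ K.count k then 3 else 2, k.2]

-- pvA_find with the predicate in key form (equal to it whenever 1 ≤ e, see pvA_find_eq_pvFind)
def pvFind (k : Int × Int) : List (List Int) → Option (List (List Int))
  | [] => none
  | e :: t =>
    if pvPred k e then some (pvSet3 e :: t)
    else
      match pvFind k t with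
      | some r => some (e :: r)
      | none => none

-- A's loop body, with the key precomputed
def pvStepK (st : List (List Int)) (k : Int × Int) : List (List Int) :=
  match pvFind k st with
  | some l => l
  | none => st ++ [[k.1, 2, k.2]]

-- ---- row-level facts ----

theorem pvSet3_shape (a b : Int) (t : List Int) : pvSet3 (a :: b :: t) = a :: 3 :: t := by
  simp [pvSet3, PySem.List.pySetD, PySem.List.pySet?, PySem.List.pyIdx?]

theorem pvSet3_ok (ed : List Int) : pvOk (pvSet3 ed) = pvOk ed := by
  rcases ed with _ | ⟨a, _ | ⟨b, t⟩⟩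
  · rfl
  · rfl
  · simp [pvSet3_shape, pvOk]

theorem pvSet3_key (ed : List Int) : pvKeyOf (pvSet3 ed) = pvKeyOf ed := by
  rcases ed with _ | ⟨a, _ | ⟨b, t⟩⟩
  · rfl
  · rfl
  · simp [pvSet3_shape, pvKeyOf, PySem.List.pyGetD, PySem.List.pyGet?, PySem.List.pyIdx?]
    constructor <;> split_ifs <;> simp

theorem pvSet3_idem (ed : List Int) : pvSet3 (pvSet3 ed) = pvSet3 ed := by
  rcases ed with _ | ⟨a, _ | ⟨b, t⟩⟩
  · rfl
  · rfl
  · simp [pvSet3_shape]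

theorem pvPred_set3 (k : Int × Int) (ed : List Int) : pvPred k (pvSet3 ed) = pvPred k ed := by
  simp [pvPred, pvSet3_ok, pvSet3_key]

theorem pvKeyOf_row (s m e : Int) : pvKeyOf [s, m, e] = (s, e) := by
  simp [pvKeyOf, PySem.List.pyGetD, PySem.List.pyGet?, PySem.List.pyIdx?]

theorem pvOk_row (s m e : Int) : pvOk [s, m, e] = true := by
  simp [pvOk]

theorem pvSet3_row (s m e : Int) : pvSet3 [s, m, e] = [s, 3, e] := by
  simp [pvSet3_shape]

-- a row shorter than 3 has no cell 2: the port reads the default 0 there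
theorem pv_short_row_cell2 (ed : List Int) (h : ¬ 2 < ed.length) :
    PySem.List.pyGetD ed 2 0 = 0 := by
  rcases ed with _ | ⟨a0, _ | ⟨a1, _ | ⟨a2, t⟩⟩⟩
  · rfl
  · rfl
  · rfl
  · simp at h

-- for a target position 1 ≤ e, A's raw scan condition is the well-formedness-guarded key match
theorem pv_pred_eq (s e : Int) (he : 1 ≤ e) (ed : List Int) :
    (PySem.List.pyGetD ed 0 0 == s && PySem.List.pyGetD ed 2 0 == e) = pvPred (s, e) ed := by
  by_cases h : 2 < ed.length
  · have hok : pvOk ed = true := by simp [pvOk, h]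
    simp only [pvPred, hok, Bool.true_and, pvKeyOf]
    rfl
  · have h2 := pv_short_row_cell2 ed h
    simp [pvPred, pvOk, h, h2]
    omega

theorem pvPred_row (x k : Int × Int) (m : Int) : pvPred x [k.1, m, k.2] = (k == x) := by
  simp [pvPred, pvOk_row, pvKeyOf_row]

-- ---- pvHas ----

theorem pvHas_cons (e : List Int) (t : List (List Int)) (k : Int × Int) :
    pvHas (e :: t) k = (pvPred k e || pvHas t k) := by
  simp [pvHas]

theorem pvHas_append (L M : List (List Int)) (k : Int × Int) :
    pvHas (L ++ M) k = (pvHas L k || pvHas M k) := by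
  simp [pvHas, List.any_append]

-- ---- pvFo ----

theorem pvFo_mem (K : List (Int × Int)) (x : Int × Int) : x ∈ pvFo K ↔ x ∈ K := by
  induction K with
  | nil => simp [pvFo]
  | cons k t ih =>
    simp only [pvFo, List.mem_cons, List.mem_filter, ih, decide_eq_true_eq]
    by_cases hx : x = k <;> simp [hx]

theorem pvFo_nodup (K : List (Int × Int)) : (pvFo K).Nodup := by
  induction K with
  | nil => simp [pvFo]
  | cons k t ih =>
    simp only [pvFo, List.nodup_cons]
    refine ⟨?_, ih.filter _⟩
    intro hk
    rcases List.mem_filter.mp hk with ⟨-, hne⟩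
    simp at hne

-- ---- pvMark ----

theorem pvMark_nil_left : ∀ (L : List (List Int)), pvMark [] L = (L, []) := by
  intro L
  induction L with
  | nil => rfl
  | cons e t ih => simp [pvMark, ih]

theorem pvMark_append (rem : List (Int × Int)) (L M : List (List Int)) :
    pvMark rem (L ++ M)
      = ((pvMark rem L).1 ++ (pvMark (pvMark rem L).2 M).1, (pvMark (pvMark rem L).2 M).2) := by
  induction L generalizing rem with
  | nil => simp [pvMark]
  | cons e t ih =>
    by_cases hc : (pvOk e && decide (pvKeyOf e ∈ rem)) = true
    · simp [pvMark, hc, ih]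
    · simp [pvMark, hc, ih]

theorem pvMark_snd (rem : List (Int × Int)) (L : List (List Int)) (hnd : rem.Nodup) :
    (pvMark rem L).2 = rem.filter (fun x => !pvHas L x) := by
  induction L generalizing rem with
  | nil => simp [pvMark, pvHas]
  | cons e t ih =>
    by_cases hok : pvOk e = true
    · by_cases hmem : pvKeyOf e ∈ rem
      · have hc : (pvOk e && decide (pvKeyOf e ∈ rem)) = true := by simp [hok, hmem]
        rw [pvMark]
        simp only [hc, if_true]
        rw [ih _ (hnd.erase _), hnd.erase_eq_filter, List.filter_filter]
        apply List.filter_congr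
        intro x hx
        by_cases hxk : x = pvKeyOf e
        · subst hxk
          have hpe : pvPred (pvKeyOf e) e = true := by simp [pvPred, hok]
          simp [pvHas_cons, hpe, decide_not]
        · have hpe : pvPred x e = false := by
            have hne : (pvKeyOf e == x) = false := by
              rw [beq_eq_false_iff_ne]
              exact fun h => hxk h.symm
            simp [pvPred, hok, hne]
          simp [pvHas_cons, hpe, hxk, decide_not, Ne.symm hxk]
      · have hc : (pvOk e && decide (pvKeyOf e ∈ rem)) = false := by simp [hmem]
        rw [pvMark]
        simp only [hc, Bool.false_eq_true, if_false]
        rw [ih _ hnd]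
        apply List.filter_congr
        intro x hx
        have hpe : pvPred x e = false := by
          have hne : (pvKeyOf e == x) = false := by
            rw [beq_eq_false_iff_ne]
            intro h; exact hmem (h ▸ hx)
          simp [pvPred, hok, hne]
        simp [pvHas_cons, hpe, decide_not]
    · have hokf : pvOk e = false := Bool.eq_false_iff.mpr hok
      rw [pvMark]
      simp only [hokf, Bool.false_and, Bool.false_eq_true, if_false]
      rw [ih _ hnd]
      apply List.filter_congr
      intro x hx
      have hpe : pvPred x e = false := by simp [pvPred, hokf]
      simp [pvHas_cons, hpe, decide_not]

theorem pvMark_fst_congr (L : List (List Int)) :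
    ∀ (rem₁ rem₂ : List (Int × Int)), rem₁.Nodup → rem₂.Nodup →
      (∀ x, x ∈ rem₁ ↔ x ∈ rem₂) → (pvMark rem₁ L).1 = (pvMark rem₂ L).1 := by
  induction L with
  | nil => intro _ _ _ _ _; rfl
  | cons e t ih =>
    intro rem₁ rem₂ h1 h2 h
    have hmemeq : (pvKeyOf e ∈ rem₁) ↔ (pvKeyOf e ∈ rem₂) := h _
    by_cases hc : (pvOk e && decide (pvKeyOf e ∈ rem₁)) = true
    · have hc2 : (pvOk e && decide (pvKeyOf e ∈ rem₂)) = true := by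
        have hc' : pvOk e = true ∧ pvKeyOf e ∈ rem₁ := by simpa using hc
        simp [hc'.1, hmemeq.mp hc'.2]
      rw [pvMark, pvMark]
      simp only [hc, hc2, if_true]
      have := ih (rem₁.erase (pvKeyOf e)) (rem₂.erase (pvKeyOf e)) (h1.erase _) (h2.erase _)
        (by intro x; rw [h1.mem_erase_iff, h2.mem_erase_iff, h x])
      simp [this]
    · have hc2 : (pvOk e && decide (pvKeyOf e ∈ rem₂)) = false := by
        by_cases hok : pvOk e = true
        · have hm : pvKeyOf e ∉ rem₁ := fun hmm => hc (by simp [hok, hmm])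
          simp [hok, hmemeq.not.mp hm]
        · simp [Bool.eq_false_iff.mpr hok]
      rw [pvMark, pvMark]
      simp only [Bool.eq_false_iff.mpr hc, hc2, Bool.false_eq_true, if_false]
      have := ih rem₁ rem₂ h1 h2 h
      simp [this]

theorem pv_filter_erase (a k : Int × Int) (hak : a ≠ k) :
    ∀ l : List (Int × Int),
      (l.filter (fun x => decide (x ≠ k))).erase a = (l.erase a).filter (fun x => decide (x ≠ k))
  | [] => rfl
  | y :: ys => by
    by_cases hya : y = a
    · subst hya
      rw [List.filter_cons, if_pos (by simpa using hak), List.erase_cons_head,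
        List.erase_cons_head]
    · rw [List.erase_cons_tail (by simp [hya]), List.filter_cons, List.filter_cons]
      by_cases hyk : y = k
      · rw [if_neg (by simp [hyk]), if_neg (by simp [hyk])]
        exact pv_filter_erase a k hak ys
      · rw [if_pos (by simpa using hyk), if_pos (by simpa using hyk),
          List.erase_cons_tail (by simp [hya]), pv_filter_erase a k hak ys]

theorem pvMark_drop_absent (k : Int × Int) (L : List (List Int)) :
    pvHas L k = false → ∀ rem : List (Int × Int),
      (pvMark rem L).1 = (pvMark (rem.filter (fun x => decide (x ≠ k))) L).1 := by
  induction L with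
  | nil => intro _ _; rfl
  | cons e t ih =>
    intro h rem
    rw [pvHas_cons, Bool.or_eq_false_iff] at h
    obtain ⟨hpe, ht⟩ := h
    by_cases hok : pvOk e = true
    · have hkey : pvKeyOf e ≠ k := by
        intro hk
        rw [pvPred, hok, Bool.true_and, hk] at hpe
        simp at hpe
      have hmem : (pvKeyOf e ∈ rem.filter (fun x => decide (x ≠ k))) ↔ pvKeyOf e ∈ rem := by
        simp [List.mem_filter, hkey]
      by_cases hm : pvKeyOf e ∈ rem
      · have hc1 : (pvOk e && decide (pvKeyOf e ∈ rem)) = true := by simp [hok, hm]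
        have hc2 : (pvOk e && decide (pvKeyOf e ∈ rem.filter (fun x => decide (x ≠ k)))) = true := by
          rw [hok, Bool.true_and, decide_eq_true_eq]
          exact hmem.mpr hm
        rw [pvMark, pvMark]
        simp only [hc1, hc2, if_true]
        rw [ih ht (rem.erase (pvKeyOf e)), pv_filter_erase (pvKeyOf e) k hkey rem]
      · have hc1 : (pvOk e && decide (pvKeyOf e ∈ rem)) = false := by simp [hm]
        have hc2 : (pvOk e && decide (pvKeyOf e ∈ rem.filter (fun x => decide (x ≠ k)))) = false := by
          rw [hok, Bool.true_and]
          rw [decide_eq_false (hmem.not.mpr hm)]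
        rw [pvMark, pvMark]
        simp only [hc1, hc2, Bool.false_eq_true, if_false]
        rw [ih ht rem]
    · have hokf : pvOk e = false := Bool.eq_false_iff.mpr hok
      rw [pvMark, pvMark]
      simp only [hokf, Bool.false_and, Bool.false_eq_true, if_false]
      rw [ih ht rem]

-- ---- pvFind ----

theorem pvA_find_eq_pvFind (s e : Int) (he : 1 ≤ e) :
    ∀ L : List (List Int), pvA_find s e L = pvFind (s, e) L := by
  intro L
  induction L with
  | nil => rfl
  | cons ed t ih =>
    rw [pvA_find, pvFind, pv_pred_eq s e he ed, ih]
    rfl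

theorem pvFind_eq_none_iff (k : Int × Int) :
    ∀ L : List (List Int), pvFind k L = none ↔ pvHas L k = false := by
  intro L
  induction L with
  | nil => simp [pvFind, pvHas]
  | cons e t ih =>
    rw [pvFind, pvHas_cons]
    by_cases hp : pvPred k e = true
    · simp [hp]
    · have hpf : pvPred k e = false := Bool.eq_false_iff.mpr hp
      simp only [hpf, Bool.false_eq_true, if_false, Bool.false_or]
      cases hfind : pvFind k t with
      | none => simp [ih.mp hfind]
      | some r =>
        constructor
        · intro h; simp at h
        · intro h
          rw [ih.mpr h] at hfind
          simp at hfind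

theorem pvFind_has (k : Int × Int) (L : List (List Int)) :
    ∀ L', pvFind k L = some L' → ∀ k', pvHas L' k' = pvHas L k' := by
  induction L with
  | nil => intro L' h; simp [pvFind] at h
  | cons e t ih =>
    intro L' h
    rw [pvFind] at h
    by_cases hp : pvPred k e = true
    · rw [if_pos hp] at h
      cases h
      intro k'
      rw [pvHas_cons, pvHas_cons, pvPred_set3]
    · rw [if_neg (by simp [hp])] at h
      cases hfind : pvFind k t with
      | none => rw [hfind] at h; simp at h
      | some r =>
        rw [hfind] at h
        cases h
        intro k'
        rw [pvHas_cons, pvHas_cons, ih r hfind k']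

theorem pvMark_markOne (k : Int × Int) (L : List (List Int)) :
    ∀ L' (rem : List (Int × Int)), k ∉ rem → pvFind k L = some L' →
      (pvMark rem L').1 = (pvMark (k :: rem) L).1 := by
  induction L with
  | nil => intro L' rem _ h; simp [pvFind] at h
  | cons e t ih =>
    intro L' rem hk h
    rw [pvFind] at h
    by_cases hp : pvPred k e = true
    · rw [if_pos hp] at h
      cases h
      have hp' : pvOk e = true ∧ pvKeyOf e = k := by simpa [pvPred] using hp
      obtain ⟨hok, hkeq⟩ := hp'
      have hc1 : (pvOk (pvSet3 e) && decide (pvKeyOf (pvSet3 e) ∈ rem)) = false := by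
        simp [pvSet3_key, hkeq, hk]
      have hc2 : (pvOk e && decide (pvKeyOf e ∈ (k :: rem))) = true := by
        simp [hok, hkeq]
      rw [pvMark, pvMark]
      simp only [hc1, hc2, Bool.false_eq_true, if_false, if_true, hkeq, List.erase_cons_head]
      simp [hok]
    · rw [if_neg (by simp [hp])] at h
      cases hfind : pvFind k t with
      | none => rw [hfind] at h; simp at h
      | some r =>
        rw [hfind] at h
        cases h
        by_cases hok : pvOk e = true
        · have hkne : pvKeyOf e ≠ k := by
            intro hkeq
            exact hp (by simp [pvPred, hok, hkeq])
          by_cases hm : pvKeyOf e ∈ rem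
          · have hc1 : (pvOk e && decide (pvKeyOf e ∈ rem)) = true := by simp [hok, hm]
            have hc2 : (pvOk e && decide (pvKeyOf e ∈ (k :: rem))) = true := by
              simp [hok, List.mem_cons, hm]
            rw [pvMark, pvMark]
            simp only [hc1, hc2, if_true]
            have herase : (k :: rem).erase (pvKeyOf e) = k :: rem.erase (pvKeyOf e) := by
              rw [List.erase_cons_tail (by simp [Ne.symm hkne])]
            rw [herase, ih r (rem.erase (pvKeyOf e)) (fun hmm => hk (List.mem_of_mem_erase hmm)) hfind]
          · have hc1 : (pvOk e && decide (pvKeyOf e ∈ rem)) = false := by simp [hm]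
            have hc2 : (pvOk e && decide (pvKeyOf e ∈ (k :: rem))) = false := by
              simp [List.mem_cons, hm, hkne]
            rw [pvMark, pvMark]
            simp only [hc1, hc2, Bool.false_eq_true, if_false]
            rw [ih r rem hk hfind]
        · have hokf : pvOk e = false := Bool.eq_false_iff.mpr hok
          rw [pvMark, pvMark]
          simp only [hokf, Bool.false_and, Bool.false_eq_true, if_false]
          rw [ih r rem hk hfind]

theorem pvMark_markOne' (k : Int × Int) (L : List (List Int)) :
    ∀ L' (rem : List (Int × Int)), k ∉ rem → pvFind k L = some L' →
      (pvMark (k :: rem) L').1 = (pvMark rem L').1 := by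
  induction L with
  | nil => intro L' rem _ h; simp [pvFind] at h
  | cons e t ih =>
    intro L' rem hk h
    rw [pvFind] at h
    by_cases hp : pvPred k e = true
    · rw [if_pos hp] at h
      cases h
      have hp' : pvOk e = true ∧ pvKeyOf e = k := by simpa [pvPred] using hp
      obtain ⟨hok, hkeq⟩ := hp'
      have hc1 : (pvOk (pvSet3 e) && decide (pvKeyOf (pvSet3 e) ∈ (k :: rem))) = true := by
        simp [pvSet3_ok, pvSet3_key, hok, hkeq]
      have hc2 : (pvOk (pvSet3 e) && decide (pvKeyOf (pvSet3 e) ∈ rem)) = false := by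
        simp [pvSet3_key, hkeq, hk]
      rw [pvMark, pvMark]
      simp only [hc1, hc2, Bool.false_eq_true, if_false, if_true, pvSet3_key, hkeq,
        List.erase_cons_head, pvSet3_idem]
      simp [pvSet3_ok, hok, hk]
    · rw [if_neg (by simp [hp])] at h
      cases hfind : pvFind k t with
      | none => rw [hfind] at h; simp at h
      | some r =>
        rw [hfind] at h
        cases h
        by_cases hok : pvOk e = true
        · have hkne : pvKeyOf e ≠ k := by
            intro hkeq
            exact hp (by simp [pvPred, hok, hkeq])
          by_cases hm : pvKeyOf e ∈ rem
          · have hc1 : (pvOk e && decide (pvKeyOf e ∈ (k :: rem))) = true := by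
              simp [hok, List.mem_cons, hm]
            have hc2 : (pvOk e && decide (pvKeyOf e ∈ rem)) = true := by simp [hok, hm]
            rw [pvMark, pvMark]
            simp only [hc1, hc2, if_true]
            have herase : (k :: rem).erase (pvKeyOf e) = k :: rem.erase (pvKeyOf e) := by
              rw [List.erase_cons_tail (by simp [Ne.symm hkne])]
            rw [herase, ih r (rem.erase (pvKeyOf e)) (fun hmm => hk (List.mem_of_mem_erase hmm)) hfind]
          · have hc1 : (pvOk e && decide (pvKeyOf e ∈ (k :: rem))) = false := by
              simp [List.mem_cons, hm, hkne]
            have hc2 : (pvOk e && decide (pvKeyOf e ∈ rem)) = false := by simp [hm]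
            rw [pvMark, pvMark]
            simp only [hc1, hc2, Bool.false_eq_true, if_false]
            rw [ih r rem hk hfind]
        · have hokf : pvOk e = false := Bool.eq_false_iff.mpr hok
          rw [pvMark, pvMark]
          simp only [hokf, Bool.false_and, Bool.false_eq_true, if_false]
          rw [ih r rem hk hfind]

-- ---- the canonical staged form of A's sequential loop ----

theorem pvFold_eq : ∀ (K : List (Int × Int)) (L : List (List Int)),
    K.foldl pvStepK L
      = (pvMark (pvFo K) L).1 ++ ((pvFo K).filter (fun x => !pvHas L x)).map (pvRow K)
  | [], L => by simp [pvFo, pvMark_nil_left]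
  | k :: T, L => by
    have hRnd : (pvFo T).Nodup := pvFo_nodup T
    have hR'nd : ((pvFo T).filter (fun x => decide (x ≠ k))).Nodup := hRnd.filter _
    have hkR' : k ∉ (pvFo T).filter (fun x => decide (x ≠ k)) := by
      intro hk; rcases List.mem_filter.mp hk with ⟨-, h⟩; simp at h
    have hFk : pvFo (k :: T) = k :: (pvFo T).filter (fun x => decide (x ≠ k)) := rfl
    rw [List.foldl_cons]
    cases hf : pvFind k L with
    | some L' =>
      have hstep : pvStepK L k = L' := by simp [pvStepK, hf]
      have hhasL : pvHas L k = true := by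
        cases hhb : pvHas L k with
        | false => rw [(pvFind_eq_none_iff k L).mpr hhb] at hf; simp at hf
        | true => rfl
      rw [hstep, pvFold_eq T L']
      have hhas := pvFind_has k L L' hf
      have hfun : (fun x => !pvHas L' x) = (fun x => !pvHas L x) :=
        funext fun x => by rw [hhas x]
      have hmark1 : (pvMark (pvFo T) L').1
          = (pvMark ((pvFo T).filter (fun x => decide (x ≠ k))) L').1 := by
        by_cases hkT : k ∈ pvFo T
        · have h1 := pvMark_fst_congr L' (pvFo T)
            (k :: (pvFo T).filter (fun x => decide (x ≠ k))) hRnd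
            (List.nodup_cons.mpr ⟨hkR', hR'nd⟩)
            (by
              intro x
              simp only [List.mem_cons, List.mem_filter, decide_eq_true_eq]
              by_cases hx : x = k <;> simp [hx, hkT])
          rw [h1, pvMark_markOne' k L L' _ hkR' hf]
        · have hself : (pvFo T).filter (fun x => decide (x ≠ k)) = pvFo T := by
            apply List.filter_eq_self.mpr
            intro x hx
            simp only [decide_eq_true_eq]
            rintro rfl; exact hkT hx
          rw [hself]
      have hmark : (pvMark (pvFo (k :: T)) L).1 = (pvMark (pvFo T) L').1 := by
        rw [hFk, ← pvMark_markOne k L L' _ hkR' hf, hmark1]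
      rw [hfun, hmark]
      congr 1
      -- filter/map side
      have hfilt : (pvFo T).filter (fun x => !pvHas L x)
          = ((pvFo T).filter (fun x => decide (x ≠ k))).filter (fun x => !pvHas L x) := by
        rw [List.filter_filter]
        apply List.filter_congr
        intro x hx
        by_cases hxk : x = k
        · subst hxk; simp [hhasL]
        · simp [hxk]
      rw [hfilt, hFk, List.filter_cons]
      simp only [hhasL, Bool.not_true, Bool.false_eq_true, if_false]
      apply List.map_congr_left
      intro x hx
      have hxk : x ≠ k := by
        rcases List.mem_filter.mp hx with ⟨hxR', -⟩
        rcases List.mem_filter.mp hxR' with ⟨-, hne⟩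
        exact of_decide_eq_true hne
      simp [pvRow, List.count_cons, hxk, Ne.symm hxk]
    | none =>
      have hstep : pvStepK L k = L ++ [[k.1, 2, k.2]] := by simp [pvStepK, hf]
      have hhasL : pvHas L k = false := (pvFind_eq_none_iff k L).mp hf
      rw [hstep, pvFold_eq T (L ++ [[k.1, 2, k.2]])]
      have hkey0 : pvKeyOf [k.1, 2, k.2] = k := by rw [pvKeyOf_row]
      have hu : (pvMark (pvFo T) L).2 = (pvFo T).filter (fun x => !pvHas L x) :=
        pvMark_snd _ L hRnd
      have hkmemu : (k ∈ (pvMark (pvFo T) L).2) ↔ k ∈ T := by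
        rw [hu, List.mem_filter]
        simp [hhasL, pvFo_mem]
      have hcnt : (2 ≤ (k :: T).count k) ↔ k ∈ T := by
        rw [List.count_cons_self]
        constructor
        · intro h
          have : 0 < T.count k := by omega
          exact List.count_pos_iff.mp this
        · intro h
          have := List.count_pos_iff.mpr h
          omega
      have hone : (pvMark ((pvMark (pvFo T) L).2) [[k.1, 2, k.2]]).1 = [pvRow (k :: T) k] := by
        by_cases hkT : k ∈ T
        · have hcond : (pvOk [k.1, 2, k.2] && decide (pvKeyOf [k.1, 2, k.2] ∈ (pvMark (pvFo T) L).2)) = true := by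
            simp [pvOk_row, hkey0, hkmemu.mpr hkT]
          rw [pvMark]
          simp only [hcond, if_true, pvMark]
          rw [pvSet3_row]
          simp [pvRow, hcnt, hkT]
        · have hcond : (pvOk [k.1, 2, k.2] && decide (pvKeyOf [k.1, 2, k.2] ∈ (pvMark (pvFo T) L).2)) = false := by
            simp [hkey0, hkmemu, hkT]
          rw [pvMark]
          simp only [hcond, Bool.false_eq_true, if_false, pvMark]
          have : pvRow (k :: T) k = [k.1, 2, k.2] := by
            simp [pvRow, hcnt, hkT]
          rw [this]
        -- end hone
      have hhasApp : ∀ x, pvHas (L ++ [[k.1, 2, k.2]]) x = (pvHas L x || (k == x)) := by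
        intro x
        rw [pvHas_append]
        simp [pvHas, pvPred_row]
      have hmark : (pvMark (pvFo (k :: T)) L).1 = (pvMark (pvFo T) L).1 := by
        rw [hFk]
        have h1 := pvMark_drop_absent k L hhasL (k :: (pvFo T).filter (fun x => decide (x ≠ k)))
        have h2 := pvMark_drop_absent k L hhasL (pvFo T)
        have hff : (k :: (pvFo T).filter (fun x => decide (x ≠ k))).filter (fun x => decide (x ≠ k))
            = (pvFo T).filter (fun x => decide (x ≠ k)) := by
          rw [List.filter_cons]
          simp [List.filter_filter]
        rw [h1, hff, ← h2]
      have hfilt2 : (pvFo T).filter (fun x => !pvHas (L ++ [[k.1, 2, k.2]]) x)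
          = ((pvFo T).filter (fun x => decide (x ≠ k))).filter (fun x => !pvHas L x) := by
        rw [List.filter_filter]
        apply List.filter_congr
        intro x hx
        rw [hhasApp x]
        by_cases hxk : x = k
        · subst hxk; simp [hhasL]
        · have : (k == x) = false := by simp [Ne.symm hxk]
          simp [this, hxk]
      rw [pvMark_append, hone, hmark, hfilt2, hFk, List.filter_cons]
      simp only [hhasL, Bool.not_false, if_true]
      rw [List.map_cons]
      have hmapc : (((pvFo T).filter (fun x => decide (x ≠ k))).filter (fun x => !pvHas L x)).map (pvRow T)
          = (((pvFo T).filter (fun x => decide (x ≠ k))).filter (fun x => !pvHas L x)).map (pvRow (k :: T)) := by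
        apply List.map_congr_left
        intro x hx
        have hxk : x ≠ k := by
          rcases List.mem_filter.mp hx with ⟨hxR', -⟩
          rcases List.mem_filter.mp hxR' with ⟨-, hne⟩
          exact of_decide_eq_true hne
        simp [pvRow, List.count_cons, hxk, Ne.symm hxk]
      rw [hmapc]
      simp [List.append_assoc]

-- ---- bridging A's real loop to pvStepK ----

theorem pv_index?_eq_findIdx? (xs : List Int) (v : Int) :
    PySem.List.index? xs v = List.findIdx? (fun x => x == v) xs := by
  simp [PySem.List.index?_eq_idxOf?, List.idxOf?]

theorem pvB_first_get_aux : ∀ (l pfx : List Int) (d : PySem.Dict Int Int),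
    (∀ k, d.get? k = (List.findIdx? (fun x => x == k) pfx).map (fun i => (i : Int))) →
    ∀ k, ((PySem.List.enumerate l (pfx.length : Int)).foldl
        (fun d p => if d.contains p.2 then d else d.insert p.2 p.1) d).get? k
      = (List.findIdx? (fun x => x == k) (pfx ++ l)).map (fun i => (i : Int))
  | [], pfx, d, hd, k => by simpa using hd k
  | x :: t, pfx, d, hd, k => by
    rw [PySem.List.enumerate_cons, List.foldl_cons]
    have step : ∀ k, (if d.contains x then d else d.insert x (pfx.length : Int)).get? k
        = (List.findIdx? (fun y => y == k) (pfx ++ [x])).map (fun i => (i : Int)) := by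
      intro k
      rw [List.findIdx?_append]
      by_cases hc : (d.contains x) = true
      · rw [if_pos hc]
        rw [PySem.Dict.contains_eq_isSome_get? d x, hd x] at hc
        by_cases hk : x = k
        · subst hk
          obtain ⟨j, hj⟩ : ∃ j, List.findIdx? (fun y => y == x) pfx = some j := by
            cases h : List.findIdx? (fun y => y == x) pfx with
            | none => rw [h] at hc; simp at hc
            | some j => exact ⟨j, rfl⟩
          simp [hd, hj]
        · have hsing : List.findIdx? (fun y => y == k) [x] = none := by
            rw [List.findIdx?_cons]; simp [hk]
          simp [hd, hsing]
      · rw [if_neg hc]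
        rw [PySem.Dict.contains_eq_isSome_get? d x, hd x] at hc
        have hnone : List.findIdx? (fun y => y == x) pfx = none := by
          cases h : List.findIdx? (fun y => y == x) pfx with
          | none => rfl
          | some j => rw [h] at hc; simp at hc
        by_cases hk : x = k
        · subst hk
          have hsing : List.findIdx? (fun y => y == x) [x] = some 0 := by
            rw [List.findIdx?_cons]; simp
          rw [PySem.Dict.get?_insert_self, hnone, hsing]
          simp
        · rw [PySem.Dict.get?_insert_of_ne d _ (Ne.symm hk), hd k]
          have hsing : List.findIdx? (fun y => y == k) [x] = none := by
            rw [List.findIdx?_cons]; simp [hk]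
          simp [hsing]
    have := pvB_first_get_aux t (pfx ++ [x])
      (if d.contains x then d else d.insert x (pfx.length : Int)) step k
    rw [List.append_assoc] at this
    simpa [List.length_append, Int.add_comm, push_cast] using this

theorem pvB_first_get (list2 : List Int) (v : Int) :
    (pvB_first list2).get? v = (PySem.List.index? list2 v).map (fun i => (i : Int)) := by
  have h := pvB_first_get_aux list2 [] PySem.Dict.empty
    (by intro k; simp [PySem.Dict.get?_empty]) v
  rw [pv_index?_eq_findIdx?, ← List.idxOf?]
  simp only [List.length_nil, Int.natCast_zero, List.nil_append] at h
  rw [pvB_first]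
  rw [← List.idxOf?] at h
  exact h

theorem pvA_end_pos (list2 : List Int) (b : Int) : 1 ≤ pvA_end list2 b := by
  simp only [pvA_end]
  split_ifs <;> omega

theorem pv_start_eq (list2 : List Int) (a : Int) (ha : a ∈ list2)
    (hlt : (PySem.List.index? list2 a).getD 0 + 1 < list2.length) :
    pvA_start list2 a = pvB_pos list2 (list2.length : Int) (pvB_first list2) a := by
  obtain ⟨p, hp⟩ : ∃ p, PySem.List.index? list2 a = some p := by
    cases h : PySem.List.index? list2 a with
    | none => rw [PySem.List.index?_eq_none_iff] at h; exact absurd ha h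
    | some p => exact ⟨p, rfl⟩
  have hgd : (pvB_first list2).getD a 0 = (p : Int) := by
    rw [PySem.Dict.getD_eq_get?_getD, pvB_first_get, hp]
    rfl
  rw [hp] at hlt
  simp only [Option.getD_some] at hlt
  have hlt' : ((p : Int) + 1 < (list2.length : Int)) := by exact_mod_cast hlt
  simp only [pvA_start, pvB_pos, hp, hgd, Option.getD_some, decide_eq_true hlt', Bool.true_and]

theorem pv_end_eq (list2 : List Int) (b : Int) (hb : b ∈ list2) :
    pvA_end list2 b = pvB_pos list2 (list2.length : Int) (pvB_first list2) b := by
  obtain ⟨q, hq⟩ : ∃ q, PySem.List.index? list2 b = some q := by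
    cases h : PySem.List.index? list2 b with
    | none => rw [PySem.List.index?_eq_none_iff] at h; exact absurd hb h
    | some q => exact ⟨q, rfl⟩
  have hgd : (pvB_first list2).getD b 0 = (q : Int) := by
    rw [PySem.Dict.getD_eq_get?_getD, pvB_first_get, hq]
    rfl
  simp only [pvA_end, pvB_pos, hq, hgd, Option.getD_some]
  by_cases hr : ((q : Int) < (list2.length : Int) - 1)
  · have hlt : ((q : Int) + 1 < (list2.length : Int)) := by omega
    rw [if_pos hr]
    simp only [decide_eq_true hlt, Bool.true_and]
  · have hge : ¬ ((q : Int) + 1 < (list2.length : Int)) := by omega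
    rw [if_neg hr]
    simp [decide_eq_false hge]

theorem pvA_fold_eq (list1 : List (List Int)) (list2 : List Int) (list3 : List (List Int))
    (hpre : Pre_add_dataflow list1 list2 list3) :
    add_dataflow list1 list2 list3 = (pvB_keys list1 list2).foldl pvStepK list3 := by
  unfold add_dataflow pvB_keys
  rw [List.foldl_map]
  apply PySem.List.foldl_congr_mem
  intro L n hn
  obtain ⟨-, ha, hb, hlt⟩ := hpre n hn
  have hs := pv_start_eq list2 _ ha hlt
  have he := pv_end_eq list2 _ hb
  have hepos : 1 ≤ pvA_end list2 (PySem.List.pyGetD n 1 0) := pvA_end_pos list2 _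
  simp only [pvA_step, pvStepK, ← hs, ← he,
    pvA_find_eq_pvFind _ _ hepos]

-- ---- bridging B's staged loops to the canonical form ----

theorem pvScontains (o : List (Int × Int)) (k : Int × Int) :
    PySem.Set.contains o k = decide (k ∈ o) := by
  by_cases h : k ∈ o <;> simp [PySem.Set.contains, h]

theorem pvSadd_contains (o : PySem.Set (Int × Int)) (x k : Int × Int) :
    PySem.Set.contains (PySem.Set.add o x) k = decide (k ∈ o ∨ k = x) := by
  rw [pvScontains]
  simp [PySem.Set.mem_add]

theorem pvDup_loop : ∀ (K pre : List (Int × Int)) (d : PySem.Dict (Int × Int) Bool) (o : List (Int × Int)),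
    (∀ k, d.contains k = decide (k ∈ pre)) →
    (∀ k, d.getD k false = decide (2 ≤ pre.count k)) →
    (∀ k, (K.foldl pvB_dupStep (d, o)).1.contains k = decide (k ∈ pre ++ K)) ∧
    (∀ k, (K.foldl pvB_dupStep (d, o)).1.getD k false = decide (2 ≤ (pre ++ K).count k)) ∧
    (K.foldl pvB_dupStep (d, o)).2 = o ++ (pvFo K).filter (fun x => !decide (x ∈ pre))
  | [], pre, d, o, hc, hg => by
    refine ⟨?_, ?_, ?_⟩
    · intro k; simpa using hc k
    · intro k; simpa using hg k
    · simp [pvFo]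
  | k :: K, pre, d, o, hc, hg => by
    rw [List.foldl_cons]
    by_cases hm : k ∈ pre
    · have hck : d.contains k = true := by rw [hc]; simp [hm]
      have hstep : pvB_dupStep (d, o) k = (d.insert k true, o) := by
        simp [pvB_dupStep, hck]
      rw [hstep]
      have hc' : ∀ k', (d.insert k true).contains k' = decide (k' ∈ pre ++ [k]) := by
        intro k'
        rw [PySem.Dict.contains_insert, hc]
        by_cases hk' : k' = k
        · subst hk'; simp
        · simp [hk', Ne.symm hk']
      have hg' : ∀ k', (d.insert k true).getD k' false = decide (2 ≤ (pre ++ [k]).count k') := by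
        intro k'
        rw [PySem.Dict.getD_insert]
        by_cases hk' : k' = k
        · subst hk'
          have hpos : 0 < pre.count k' := List.count_pos_iff.mpr hm
          have hcc : (pre ++ [k']).count k' = pre.count k' + 1 := by
            simp [List.count_append]
          rw [if_pos rfl, hcc]
          symm
          rw [decide_eq_true_eq]
          omega
        · rw [if_neg hk', hg]
          have h0 : ([k] : List (Int × Int)).count k' = 0 := by
            rw [List.count_eq_zero]
            simp [hk']
          rw [List.count_append, h0, Nat.add_zero]
      obtain ⟨ih1, ih2, ih3⟩ := pvDup_loop K (pre ++ [k]) (d.insert k true) o hc' hg'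
      refine ⟨?_, ?_, ?_⟩
      · intro k'
        rw [ih1 k', List.append_assoc, List.singleton_append]
      · intro k'
        rw [ih2 k', List.append_assoc, List.singleton_append]
      · rw [ih3]
        congr 1
        simp only [pvFo]
        rw [List.filter_cons]
        have : (!decide (k ∈ pre)) = false := by simp [hm]
        rw [this]
        simp only [Bool.false_eq_true, if_false, List.filter_filter]
        apply List.filter_congr
        intro x hx
        by_cases hxk : x = k
        · subst hxk; simp [hm]
        · simp [hxk]
    · have hck : d.contains k = false := by rw [hc]; simp [hm]
      have hstep : pvB_dupStep (d, o) k = (d.insert k false, o ++ [k]) := by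
        simp [pvB_dupStep, hck]
      rw [hstep]
      have hc' : ∀ k', (d.insert k false).contains k' = decide (k' ∈ pre ++ [k]) := by
        intro k'
        rw [PySem.Dict.contains_insert, hc]
        by_cases hk' : k' = k
        · subst hk'; simp
        · simp [hk', Ne.symm hk']
      have hg' : ∀ k', (d.insert k false).getD k' false = decide (2 ≤ (pre ++ [k]).count k') := by
        intro k'
        rw [PySem.Dict.getD_insert]
        by_cases hk' : k' = k
        · subst hk'
          have h0 : pre.count k' = 0 := List.count_eq_zero.mpr hm
          have hcc : (pre ++ [k']).count k' = 1 := by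
            simp [List.count_append, h0]
          rw [if_pos rfl, hcc]
          rfl
        · rw [if_neg hk', hg]
          have h0 : ([k] : List (Int × Int)).count k' = 0 := by
            rw [List.count_eq_zero]
            simp [hk']
          rw [List.count_append, h0, Nat.add_zero]
      obtain ⟨ih1, ih2, ih3⟩ := pvDup_loop K (pre ++ [k]) (d.insert k false) (o ++ [k]) hc' hg'
      refine ⟨?_, ?_, ?_⟩
      · intro k'
        rw [ih1 k', List.append_assoc, List.singleton_append]
      · intro k'
        rw [ih2 k', List.append_assoc, List.singleton_append]
      · rw [ih3]
        rw [List.append_assoc]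
        congr 1
        simp only [pvFo]
        rw [List.filter_cons]
        have : (!decide (k ∈ pre)) = true := by simp [hm]
        rw [this]
        simp only [if_true, List.singleton_append, List.filter_filter]
        congr 1
        apply List.filter_congr
        intro x hx
        by_cases hxk : x = k
        · subst hxk; simp [hm]
        · simp [hxk]

theorem pvMark_loop (dup : PySem.Dict (Int × Int) Bool) :
    ∀ (L acc : List (List Int)) (hit : PySem.Set (Int × Int)) (rem : List (Int × Int)),
      rem.Nodup →
      (∀ k, (dup.contains k && !(PySem.Set.contains hit k)) = decide (k ∈ rem)) →
      (L.foldl (pvB_markStep dup) (acc, hit)).1 = acc ++ (pvMark rem L).1 ∧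
      (∀ k, (dup.contains k && !(PySem.Set.contains (L.foldl (pvB_markStep dup) (acc, hit)).2 k))
        = decide (k ∈ (pvMark rem L).2)) := by
  intro L
  induction L with
  | nil =>
    intro acc hit rem hnd hinv
    exact ⟨by simp [pvMark], by intro k; simpa [pvMark] using hinv k⟩
  | cons e t ih =>
    intro acc hit rem hnd hinv
    rw [List.foldl_cons]
    by_cases hlen : (2 < e.length)
    · have hok : pvOk e = true := by simp [pvOk, hlen]
      by_cases hm : pvKeyOf e ∈ rem
      · have hcond : (dup.contains (PySem.List.pyGetD e 0 0, PySem.List.pyGetD e 2 0) &&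
            !(PySem.Set.contains hit (PySem.List.pyGetD e 0 0, PySem.List.pyGetD e 2 0))) = true := by
          rw [show (PySem.List.pyGetD e 0 0, PySem.List.pyGetD e 2 0) = pvKeyOf e from rfl,
            hinv (pvKeyOf e)]
          exact decide_eq_true hm
        have hstep : pvB_markStep dup (acc, hit) e
            = (acc ++ [pvSet3 e], PySem.Set.add hit (pvKeyOf e)) := by
          simp only [pvB_markStep, decide_eq_true hlen, if_true, hcond]
          rfl
        rw [hstep]
        have hinv' : ∀ k, (dup.contains k && !(PySem.Set.contains (PySem.Set.add hit (pvKeyOf e)) k))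
            = decide (k ∈ rem.erase (pvKeyOf e)) := by
          intro k
          rw [pvSadd_contains]
          by_cases hk : k = pvKeyOf e
          · subst hk
            simp [hnd.mem_erase_iff]
          · have h1 : decide (k ∈ hit ∨ k = pvKeyOf e) = decide (k ∈ hit) := by
              simp [hk]
            rw [h1, ← pvScontains, hinv k]
            simp [hnd.mem_erase_iff, hk]
        obtain ⟨ihl, ihr⟩ := ih (acc ++ [pvSet3 e]) (PySem.Set.add hit (pvKeyOf e))
          (rem.erase (pvKeyOf e)) (hnd.erase _) hinv'
        have hcondm : (pvOk e && decide (pvKeyOf e ∈ rem)) = true := by simp [hok, hm]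
        constructor
        · rw [ihl, pvMark]
          simp [hcondm]
        · intro k
          rw [ihr k, pvMark]
          simp [hcondm]
      · have hcond : (dup.contains (PySem.List.pyGetD e 0 0, PySem.List.pyGetD e 2 0) &&
            !(PySem.Set.contains hit (PySem.List.pyGetD e 0 0, PySem.List.pyGetD e 2 0))) = false := by
          rw [show (PySem.List.pyGetD e 0 0, PySem.List.pyGetD e 2 0) = pvKeyOf e from rfl,
            hinv (pvKeyOf e)]
          exact decide_eq_false hm
        have hstep : pvB_markStep dup (acc, hit) e = (acc ++ [e], hit) := by
          simp only [pvB_markStep, decide_eq_true hlen, if_true, hcond]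
          simp
        rw [hstep]
        obtain ⟨ihl, ihr⟩ := ih (acc ++ [e]) hit rem hnd hinv
        have hcondm : (pvOk e && decide (pvKeyOf e ∈ rem)) = false := by simp [hm]
        constructor
        · rw [ihl, pvMark]
          simp [hcondm]
        · intro k
          rw [ihr k, pvMark]
          simp [hcondm]
    · have hstep : pvB_markStep dup (acc, hit) e = (acc ++ [e], hit) := by
        simp [pvB_markStep, hlen]
      rw [hstep]
      obtain ⟨ihl, ihr⟩ := ih (acc ++ [e]) hit rem hnd hinv
      have hokf : pvOk e = false := by simp [pvOk, hlen]
      have hcondm : (pvOk e && decide (pvKeyOf e ∈ rem)) = false := by simp [hokf]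
      constructor
      · rw [ihl, pvMark]
        simp [hcondm]
      · intro k
        rw [ihr k, pvMark]
        simp [hcondm]

theorem pvAlt_eq (list1 : List (List Int)) (list2 : List Int) (list3 : List (List Int)) :
    add_dataflow_alt list1 list2 list3
      = (pvMark (pvFo (pvB_keys list1 list2)) list3).1
        ++ ((pvFo (pvB_keys list1 list2)).filter (fun x => !pvHas list3 x)).map
            (pvRow (pvB_keys list1 list2)) := by
  simp only [add_dataflow_alt]
  set K := pvB_keys list1 list2 with hKdef
  obtain ⟨hdc, hdg, hdo⟩ := pvDup_loop K [] PySem.Dict.empty []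
    (by intro k; simp [PySem.Dict.contains_empty])
    (by intro k; simp [PySem.Dict.getD_empty])
  set dord := K.foldl pvB_dupStep (PySem.Dict.empty, ([] : List (Int × Int))) with hdorddef
  have horder : dord.2 = pvFo K := by rw [hdo]; simp
  have hcont : ∀ k, dord.1.contains k = decide (k ∈ K) := by intro k; rw [hdc k]; simp
  have hval : ∀ k, dord.1.getD k false = decide (2 ≤ K.count k) := by intro k; rw [hdg k]; simp
  obtain ⟨hm1, hm2⟩ := pvMark_loop dord.1 list3 [] PySem.Set.empty (pvFo K) (pvFo_nodup K)
    (by intro k; rw [hcont k, pvScontains]; simp [PySem.Set.empty, pvFo_mem])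
  set mh := list3.foldl (pvB_markStep dord.1)
      (([] : List (List Int)), (PySem.Set.empty : PySem.Set (Int × Int))) with hmhdef
  rw [horder]
  have hstepeq : (fun (acc : List (List Int)) (k : Int × Int) =>
        if PySem.Set.contains mh.2 k then acc
        else acc ++ [[k.1, if dord.1.getD k false then 3 else 2, k.2]])
      = (fun (acc : List (List Int)) (k : Int × Int) =>
        if !PySem.Set.contains mh.2 k then
          acc ++ [[k.1, if dord.1.getD k false then 3 else 2, k.2]]
        else acc) := by
    funext acc k
    cases hb : PySem.Set.contains mh.2 k <;> simp [hb]
  rw [hstepeq, PySem.List.foldl_append_if, hm1]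
  simp only [List.nil_append]
  congr 1
  have hsnd := pvMark_snd (pvFo K) list3 (pvFo_nodup K)
  have hfiltc : (pvFo K).filter (fun k => !PySem.Set.contains mh.2 k)
      = (pvFo K).filter (fun x => !pvHas list3 x) := by
    apply List.filter_congr
    intro k hk
    have hdupk : dord.1.contains k = true := by
      rw [hcont k]
      simp [(pvFo_mem _ k).mp hk]
    have hh := hm2 k
    rw [hdupk, Bool.true_and] at hh
    rw [hh, hsnd]
    by_cases hhb : pvHas list3 k = true
    · simp [List.mem_filter, hhb]
    · have hhf : pvHas list3 k = false := Bool.eq_false_iff.mpr hhb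
      simp [List.mem_filter, hhf, hk]
  rw [hfiltc]
  apply List.map_congr_left
  intro k hk
  rw [hval k]
  simp only [pvRow]
  by_cases hcc : 2 ≤ K.count k
  · simp [hcc]
  · simp [hcc]

-- ===== VERDICT (by name: the statement is the Claim_ definition above) =====
theorem add_dataflow_spec : Claim_equal_add_dataflow := by
  intro list1 list2 list3 _ hpre
  unfold Spec_add_dataflow
  rw [pvA_fold_eq list1 list2 list3 hpre, pvAlt_eq, pvFold_eq]
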